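-- pv_equiv track=rewrite | github.com/msylvester/funding_agent | hooks/diff_utils.py | is_complex_edit
-- ===== SOURCE A (Python) =====
-- from typing import List, Tuple
--
-- def extract_search_replace_blocks(content: str) -> List[Tuple[str, str]]:
--     """Extract SEARCH/REPLACE blocks from content."""
--     blocks = []
--     lines = content.split('\n')
--
--     i = 0
--     while i < len(lines):
--         if '<<<<<<< SEARCH' in lines[i]:
--             search_start = i + 1
--             search_end = None
--             replace_start = None
--             replace_end = None
--
--             # Find the divider and end
--             for j in range(i + 1, len(lines)):
--                 if '=======' in lines[j]:
--                     search_end = j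
--                     replace_start = j + 1
--                 elif '>>>>>>> REPLACE' in lines[j]:
--                     replace_end = j
--                     break
--
--             if search_end is not None and replace_end is not None:
--                 search_content = '\n'.join(lines[search_start:search_end])
--                 replace_content = '\n'.join(lines[replace_start:replace_end])
--                 blocks.append((search_content, replace_content))
--                 i = replace_end + 1
--             else:
--                 i += 1
--         else:
--             i += 1
--
--     return blocks
--
-- def is_complex_edit(content: str, filename: str = "") -> bool:
--     """Determine if an edit is complex enough to require confirmation."""
--     # Check for SEARCH/REPLACE blocks
--     search_replace_blocks = extract_search_replace_blocks(content)
--     if len(search_replace_blocks) > 2: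
--         return True
--
--     # Check file size
--     lines = content.split('\n')
--     if len(lines) > 50:
--         return True
--
--     # Check for certain file types that should always be confirmed
--     sensitive_extensions = ['.py', '.js', '.ts', '.java', '.cpp', '.c', '.go', '.rs']
--     if any(filename.endswith(ext) for ext in sensitive_extensions):
--         return True
--
--     return False
-- ===== SOURCE B (Python) =====
-- def is_complex_edit(content: str, filename: str = "") -> bool:
--     """Determine if an edit is complex enough to require confirmation."""
--     # Count SEARCH/REPLACE blocks in one linear pass with a small state machine.
--     lines = content.split('\n')
--     blocks = 0
--     state = 0  # 0: outside a block, 1: inside SEARCH part, 2: divider seen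
--     for line in lines:
--         if state:
--             if '=======' in line:
--                 state = 2
--                 continue
--             if '>>>>>>> REPLACE' in line:
--                 if state == 2:
--                     blocks += 1
--                     state = 0
--                     continue
--                 # terminator with no divider: the open block is malformed;
--                 # abandon it and reread this line as ordinary input
--                 state = 0
--             else:
--                 continue
--         if '<<<<<<< SEARCH' in line:
--             state = 1
--
--     if blocks > 2:
--         return True
--     if len(lines) > 50:
--         return True
--     return any(filename.endswith(ext)
--                for ext in ('.py', '.js', '.ts', '.java', '.cpp', '.c', '.go', '.rs'))
-- ===== Notes on version B (the rewrite author's own statement) =====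
-- stated objective: alternative
-- what changed: Replaced A's nested parser (outer while with an inner rescan loop and index jumps, building the block list) by a single linear pass with a 3-state machine (outside / inside-search / divider-seen) that only counts completed SEARCH/REPLACE blocks and never revisits a previous line; a stray terminator abandons the open block and the line is reread from the outside state.
import Mathlib
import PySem

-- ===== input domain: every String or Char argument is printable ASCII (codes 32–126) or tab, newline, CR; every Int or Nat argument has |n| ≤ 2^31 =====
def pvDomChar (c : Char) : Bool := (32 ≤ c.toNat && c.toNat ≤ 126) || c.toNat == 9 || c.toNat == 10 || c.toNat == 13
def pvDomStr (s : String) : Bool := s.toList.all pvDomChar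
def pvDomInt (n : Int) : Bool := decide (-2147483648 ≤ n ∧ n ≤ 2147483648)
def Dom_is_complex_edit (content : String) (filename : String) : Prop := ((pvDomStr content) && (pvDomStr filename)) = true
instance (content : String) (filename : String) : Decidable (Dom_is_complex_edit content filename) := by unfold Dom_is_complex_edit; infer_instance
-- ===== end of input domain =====

-- B replaces A's nested-rescan block parser with one linear 3-state pass counting blocks (alternative algorithm; A rescans after failed blocks, B never revisits a previous line).


-- ===== PORT A =====

-- the three marker tests ('<marker> in line'), shared notation for both ports
def pvHasS (l : String) : Bool := PySem.Str.isIn "<<<<<<< SEARCH" l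
def pvHasD (l : String) : Bool := PySem.Str.isIn "=======" l
def pvHasR (l : String) : Bool := PySem.Str.isIn ">>>>>>> REPLACE" l

-- content.split('\n'): the separator is the nonempty literal "\n", so split? is always some
def pvSplitLines (content : String) : List String :=
  (PySem.Str.split? content "\n").getD []

-- A's inner 'for j in range(i+1, len(lines))' loop; search_end and replace_start are
-- assigned together in A, carried here as one Option pair; third component = replace_end.
-- fuel only makes the recursion structural; it is always called with fuel ≥ len - j.
def pvInnerA (lines : List String) : Nat → Nat → Option (Nat × Nat) →
    Option (Nat × Nat) × Option Nat
  | 0, _, srs => (srs, none)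
  | fuel+1, j, srs =>
    if h : j < lines.length then
      if pvHasD lines[j] then pvInnerA lines fuel (j+1) (some (j, j+1))
      else if pvHasR lines[j] then (srs, some j)
      else pvInnerA lines fuel (j+1) srs
    else (srs, none)

-- A's outer 'while i < len(lines)' loop building the blocks list (same fuel device)
def pvOuterA (lines : List String) : Nat → Nat → List (String × String) →
    List (String × String)
  | 0, _, blocks => blocks
  | fuel+1, i, blocks =>
    if h : i < lines.length then
      if pvHasS lines[i] then
        match pvInnerA lines lines.length (i+1) none with
        | (some (se, rs), some re) =>
            pvOuterA lines fuel (re+1)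
              (blocks ++ [(PySem.Str.join "\n" (PySem.List.slice lines (some ((i+1 : Nat) : Int)) (some ((se : Nat) : Int))),
                           PySem.Str.join "\n" (PySem.List.slice lines (some ((rs : Nat) : Int)) (some ((re : Nat) : Int))))])
        | (_, _) => pvOuterA lines fuel (i+1) blocks
      else pvOuterA lines fuel (i+1) blocks
    else blocks

def pvExtractA (content : String) : List (String × String) :=
  pvOuterA (pvSplitLines content) (pvSplitLines content).length 0 []

def is_complex_edit (content : String) (filename : String) : Bool :=
  let search_replace_blocks := pvExtractA content
  if search_replace_blocks.length > 2 then true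
  else
    let lines := pvSplitLines content
    if lines.length > 50 then true
    else if [".py", ".js", ".ts", ".java", ".cpp", ".c", ".go", ".rs"].any
              (fun ext => PySem.Str.endswith filename ext) then true
    else false

-- ===== PORT B =====

-- B's per-line step (0: outside a block, 1: inside SEARCH part, 2: divider seen);
-- the Python loop body's 'continue'/fall-through becomes the nested if below:
-- only the abandoned-block arm falls through to the '<<<<<<< SEARCH' check.
def pvStepB (p : Nat × Nat) (line : String) : Nat × Nat :=
  let (blocks, state) := p
  if state ≠ 0 then
    if pvHasD line then (blocks, 2)
    else if pvHasR line then
      if state = 2 then (blocks + 1, 0)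
      else (blocks, if pvHasS line then 1 else 0)
    else (blocks, state)
  else (blocks, if pvHasS line then 1 else 0)

def is_complex_edit_alt (content : String) (filename : String) : Bool :=
  let lines := pvSplitLines content
  let blocks := (lines.foldl pvStepB (0, 0)).1
  if blocks > 2 then true
  else if lines.length > 50 then true
  else [".py", ".js", ".ts", ".java", ".cpp", ".c", ".go", ".rs"].any
         (fun ext => PySem.Str.endswith filename ext)

-- ===== PRECONDITION & SPEC =====
def Spec_is_complex_edit (content : String) (filename : String) (out : Bool) : Prop := out = is_complex_edit_alt content filename
instance (content : String) (filename : String) (out : Bool) : Decidable (Spec_is_complex_edit content filename out) := by unfold Spec_is_complex_edit; infer_instance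

-- ===== CLAIM (what is proved, stated in full; the proofs are below) =====
def Claim_equal_is_complex_edit : Prop := ∀ (content : String) (filename : String), Dom_is_complex_edit content filename → Spec_is_complex_edit content filename (is_complex_edit content filename)

-- ===== LEMMAS AND PROOFS =====

-- B's state machine, rephrased as a structural recursion counting emitted blocks
def pvRun (s : Nat) : List String → Nat
  | [] => 0
  | l :: ls =>
    if s = 0 then pvRun (if pvHasS l then 1 else 0) ls
    else if pvHasD l then pvRun 2 ls
    else if pvHasR l then (if s = 2 then 1 + pvRun 0 ls else pvRun (if pvHasS l then 1 else 0) ls)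
    else pvRun s ls

theorem pvFoldl_eq_run (ls : List String) (c s : Nat) :
    (ls.foldl pvStepB (c, s)).1 = c + pvRun s ls := by
  induction ls generalizing c s with
  | nil => simp [pvRun]
  | cons l ls ih =>
      simp only [List.foldl_cons, pvStepB, pvRun]
      by_cases h0 : s = 0
      · simp [h0, ih]
      · by_cases hd : pvHasD l
        · simp [h0, hd, ih]
        · by_cases hr : pvHasR l
          · by_cases h2 : s = 2
            · simp [h0, hd, hr, h2, ih]; omega
            · simp [hd, hr, h2, ih]
          · simp [h0, hd, hr, ih]

theorem pvDrop_cons (lines : List String) (j : Nat) (h : j < lines.length) :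
    lines.drop j = lines.getD j "" :: lines.drop (j+1) := by
  rw [List.getD_eq_getElem lines "" h]
  exact List.drop_eq_getElem_cons h

-- one-step equations of the machine
theorem pvRun_cons0 (l : String) (ls : List String) :
    pvRun 0 (l :: ls) = pvRun (if pvHasS l then 1 else 0) ls := by simp [pvRun]

theorem pvRun_consD (s : Nat) (l : String) (ls : List String) (hs : s ≠ 0)
    (hd : pvHasD l = true) : pvRun s (l :: ls) = pvRun 2 ls := by simp [pvRun, hs, hd]

theorem pvRun_cons1R (l : String) (ls : List String) (hd : pvHasD l = false)
    (hr : pvHasR l = true) : pvRun 1 (l :: ls) = pvRun (if pvHasS l then 1 else 0) ls := by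
  simp [pvRun, hd, hr]

theorem pvRun_cons2R (l : String) (ls : List String) (hd : pvHasD l = false)
    (hr : pvHasR l = true) : pvRun 2 (l :: ls) = 1 + pvRun 0 ls := by simp [pvRun, hd, hr]

theorem pvRun_consQ (s : Nat) (l : String) (ls : List String) (hs : s ≠ 0)
    (hd : pvHasD l = false) (hr : pvHasR l = false) : pvRun s (l :: ls) = pvRun s ls := by
  simp [pvRun, hs, hd, hr]

-- characterization of A's inner loop result (with enough fuel to reach the end)
theorem pvInnerA_char (lines : List String) : ∀ (fuel j : Nat) (srs srs' : Option (Nat × Nat)) (re? : Option Nat),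
    lines.length ≤ j + fuel →
    pvInnerA lines fuel j srs = (srs', re?) →
    (re? = none → ∀ m, j ≤ m → m < lines.length →
        pvHasR (lines.getD m "") = true → pvHasD (lines.getD m "") = true) ∧
    (∀ k, re? = some k →
      j ≤ k ∧ k < lines.length ∧ pvHasR (lines.getD k "") = true ∧ pvHasD (lines.getD k "") = false
      ∧ (∀ m, j ≤ m → m < k → ¬(pvHasR (lines.getD m "") = true ∧ pvHasD (lines.getD m "") = false))
      ∧ (srs' = srs ∨ ∃ d, j ≤ d ∧ d < k ∧ pvHasD (lines.getD d "") = true)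
      ∧ (srs' = none → ∀ m, j ≤ m → m < k → pvHasD (lines.getD m "") = false)) := by
  intro fuel
  induction fuel with
  | zero =>
      intro j srs srs' re? hf h
      rw [pvInnerA] at h
      cases h
      exact ⟨fun _ m hm hml _ => absurd hml (by omega), fun k hk => absurd hk (by simp)⟩
  | succ fuel ih =>
      intro j srs srs' re? hf h
      by_cases h1 : j < lines.length
      · have hgj : lines.getD j "" = lines[j] := List.getD_eq_getElem lines "" h1
        rw [pvInnerA, dif_pos h1] at h
        by_cases h2 : pvHasD lines[j]
        · rw [if_pos h2] at h
          obtain ⟨ihn, ihs⟩ := ih (j+1) _ _ _ (by omega) h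
          constructor
          · intro hn m hm hml hr
            rcases Nat.eq_or_lt_of_le hm with rfl | hlt
            · rw [hgj]; exact h2
            · exact ihn hn m hlt hml hr
          · intro k hk
            obtain ⟨hk1, hk2, hk3, hk4, hseg, hdisj, hnone⟩ := ihs k hk
            refine ⟨by omega, hk2, hk3, hk4, ?_, ?_, ?_⟩
            · intro m hm hmk hc
              rcases Nat.eq_or_lt_of_le hm with rfl | hlt
              · rw [hgj] at hc; exact absurd h2 (by simp [hc.2])
              · exact hseg m hlt hmk hc
            · right
              exact ⟨j, le_refl _, by omega, by rw [hgj]; exact h2⟩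
            · intro hsn
              rcases hdisj with heq | ⟨d, hd1, hd2, hd3⟩
              · rw [hsn] at heq; exact absurd heq.symm (by simp)
              · have hfd := hnone hsn d hd1 hd2
                rw [hd3] at hfd; exact absurd hfd (by simp)
        · rw [if_neg h2] at h
          by_cases h3 : pvHasR lines[j]
          · rw [if_pos h3] at h
            cases h
            refine ⟨by simp, ?_⟩
            intro k hk
            cases hk
            refine ⟨le_refl _, h1, by rw [hgj]; exact h3, by rw [hgj]; simpa using h2, ?_, Or.inl rfl, ?_⟩
            · intro m hm hmk; omega
            · intro _ m hm hmk; omega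
          · rw [if_neg h3] at h
            obtain ⟨ihn, ihs⟩ := ih (j+1) _ _ _ (by omega) h
            constructor
            · intro hn m hm hml hr
              rcases Nat.eq_or_lt_of_le hm with rfl | hlt
              · rw [hgj] at hr; exact absurd hr h3
              · exact ihn hn m hlt hml hr
            · intro k hk
              obtain ⟨hk1, hk2, hk3, hk4, hseg, hdisj, hnone⟩ := ihs k hk
              refine ⟨by omega, hk2, hk3, hk4, ?_,
                hdisj.imp id (fun ⟨d, hd1, hd2, hd3⟩ => ⟨d, by omega, hd2, hd3⟩), ?_⟩
              · intro m hm hmk hc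
                rcases Nat.eq_or_lt_of_le hm with rfl | hlt
                · rw [hgj] at hc; exact h3 hc.1
                · exact hseg m hlt hmk hc
              · intro hsn m hm hmk
                rcases Nat.eq_or_lt_of_le hm with rfl | hlt
                · rw [hgj]; simpa using h2
                · exact hnone hsn m hlt hmk
      · rw [pvInnerA, dif_neg h1] at h
        cases h
        exact ⟨fun _ m hm hml _ => absurd hml (by omega), fun k hk => absurd hk (by simp)⟩

-- if no line has REPLACE without a divider, the machine never emits
theorem pvRun_zero (ls : List String) (h : ∀ l ∈ ls, pvHasR l = true → pvHasD l = true) :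
    ∀ s, pvRun s ls = 0 := by
  induction ls with
  | nil => intro s; simp [pvRun]
  | cons l ls ih =>
      intro s
      have hl := h l (by simp)
      have ht : ∀ l' ∈ ls, pvHasR l' = true → pvHasD l' = true := fun l' hm => h l' (by simp [hm])
      simp only [pvRun]
      by_cases h0 : s = 0
      · simp [h0, ih ht]
      · by_cases hd : pvHasD l
        · simp [h0, hd, ih ht]
        · have hr : pvHasR l = false := by
            cases hhr : pvHasR l
            · rfl
            · exact absurd (hl hhr) hd
          simp [h0, hd, hr, ih ht]

-- walking a no-emission segment keeps state 2
theorem pvRun_walk2 (lines : List String) : ∀ (n j k : Nat), k - j ≤ n → j ≤ k → k ≤ lines.length →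
    (∀ m, j ≤ m → m < k → ¬(pvHasR (lines.getD m "") = true ∧ pvHasD (lines.getD m "") = false)) →
    pvRun 2 (lines.drop j) = pvRun 2 (lines.drop k) := by
  intro n
  induction n with
  | zero =>
      intro j k h1 h2 h3 _
      obtain rfl : j = k := by omega
      rfl
  | succ n ih =>
      intro j k h1 h2 h3 hseg
      rcases Nat.eq_or_lt_of_le h2 with rfl | hlt
      · rfl
      · have hj : j < lines.length := by omega
        rw [pvDrop_cons lines j hj]
        have hm := hseg j (le_refl _) hlt
        by_cases hd : pvHasD (lines.getD j "")
        · rw [pvRun_consD 2 _ _ (by omega) hd]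
          exact ih (j+1) k (by omega) (by omega) h3 (fun m hm1 hm2 => hseg m (by omega) hm2)
        · have hd' : pvHasD (lines.getD j "") = false := by simpa using hd
          have hr : pvHasR (lines.getD j "") = false := by
            cases hhr : pvHasR (lines.getD j "")
            · rfl
            · exact absurd ⟨hhr, hd'⟩ hm
          rw [pvRun_consQ 2 _ _ (by omega) hd' hr]
          exact ih (j+1) k (by omega) (by omega) h3 (fun m hm1 hm2 => hseg m (by omega) hm2)

-- over a marker-free segment ending at a bare REPLACE line, idle and in-search agree
theorem pvRun_walk01 (lines : List String) : ∀ (n j k : Nat), k - j ≤ n → j ≤ k → k < lines.length →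
    (∀ m, j ≤ m → m < k → pvHasD (lines.getD m "") = false ∧ pvHasR (lines.getD m "") = false) →
    pvHasR (lines.getD k "") = true → pvHasD (lines.getD k "") = false →
    pvRun 0 (lines.drop j) = pvRun 1 (lines.drop j) := by
  intro n
  induction n with
  | zero =>
      intro j k h1 h2 h3 _ hrk hdk
      obtain rfl : j = k := by omega
      rw [pvDrop_cons lines j h3, pvRun_cons0, pvRun_cons1R _ _ hdk hrk]
  | succ n ih =>
      intro j k h1 h2 h3 hseg hrk hdk
      rcases Nat.eq_or_lt_of_le h2 with rfl | hlt
      · rw [pvDrop_cons lines j h3, pvRun_cons0, pvRun_cons1R _ _ hdk hrk]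
      · have hj : j < lines.length := by omega
        obtain ⟨hd, hr⟩ := hseg j (le_refl _) hlt
        rw [pvDrop_cons lines j hj, pvRun_cons0, pvRun_consQ 1 _ _ (by omega) hd hr]
        by_cases hs : pvHasS (lines.getD j "")
        · rw [if_pos hs]
        · rw [if_neg hs]
          exact ih (j+1) k (by omega) (by omega) h3 (fun m hm1 hm2 => hseg m (by omega) hm2) hrk hdk

-- once a divider occurs before the closing REPLACE, in-search behaves like divider-seen
theorem pvRun_walk12 (lines : List String) : ∀ (n j k : Nat), k - j ≤ n → j ≤ k → k ≤ lines.length →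
    (∀ m, j ≤ m → m < k → ¬(pvHasR (lines.getD m "") = true ∧ pvHasD (lines.getD m "") = false)) →
    (∃ d, j ≤ d ∧ d < k ∧ pvHasD (lines.getD d "") = true) →
    pvRun 1 (lines.drop j) = pvRun 2 (lines.drop j) := by
  intro n
  induction n with
  | zero => intro j k h1 h2 h3 _ ⟨d, hd1, hd2, _⟩; omega
  | succ n ih =>
      intro j k h1 h2 h3 hseg ⟨d, hd1, hd2, hd3⟩
      have hj : j < lines.length := by omega
      rw [pvDrop_cons lines j hj]
      by_cases hd : pvHasD (lines.getD j "")
      · rw [pvRun_consD 1 _ _ (by omega) hd, pvRun_consD 2 _ _ (by omega) hd]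
      · have hd' : pvHasD (lines.getD j "") = false := by simpa using hd
        have hdj : d ≠ j := fun hc => hd (hc ▸ hd3)
        have hr : pvHasR (lines.getD j "") = false := by
          cases hhr : pvHasR (lines.getD j "")
          · rfl
          · exact absurd ⟨hhr, hd'⟩ (hseg j (le_refl _) (by omega))
        rw [pvRun_consQ 1 _ _ (by omega) hd' hr, pvRun_consQ 2 _ _ (by omega) hd' hr]
        exact ih (j+1) k (by omega) (by omega) h3 (fun m hm1 hm2 => hseg m (by omega) hm2)
          ⟨d, by omega, hd2, hd3⟩

-- the closing REPLACE line emits from state 2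
theorem pvRun_emit (lines : List String) (k : Nat) (h : k < lines.length)
    (hrk : pvHasR (lines.getD k "") = true) (hdk : pvHasD (lines.getD k "") = false) :
    pvRun 2 (lines.drop k) = 1 + pvRun 0 (lines.drop (k+1)) := by
  rw [pvDrop_cons lines k h, pvRun_cons2R _ _ hdk hrk]

-- main bridge: A's outer loop emits exactly as many blocks as B's machine from idle
theorem pvOuterA_run (lines : List String) : ∀ (fuel i : Nat) (blocks : List (String × String)),
    lines.length - i ≤ fuel →
    (pvOuterA lines fuel i blocks).length = blocks.length + pvRun 0 (lines.drop i) := by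
  intro fuel
  induction fuel with
  | zero =>
      intro i blocks h1
      rw [pvOuterA, List.drop_eq_nil_of_le (by omega)]
      simp [pvRun]
  | succ fuel ih =>
      intro i blocks h1
      by_cases hi : i < lines.length
      · have hgi : lines.getD i "" = lines[i] := List.getD_eq_getElem lines "" hi
        rw [pvOuterA, dif_pos hi]
        by_cases hs : pvHasS lines[i]
        · rw [if_pos hs]
          rcases hin : pvInnerA lines lines.length (i+1) none with ⟨srs', re?⟩
          obtain ⟨hnone, hsome⟩ := pvInnerA_char lines lines.length (i+1) none srs' re? (by omega) hin
          have hstep : pvRun 0 (lines.drop i) = pvRun 1 (lines.drop (i+1)) := by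
            rw [pvDrop_cons lines i hi, pvRun_cons0, if_pos (hgi ▸ hs)]
          match srs', re? with
          | some (se, rs), some k =>
              obtain ⟨hk1, hk2, hk3, hk4, hseg, hdisj, _⟩ := hsome k rfl
              have hdiv : ∃ d, i+1 ≤ d ∧ d < k ∧ pvHasD (lines.getD d "") = true := by
                rcases hdisj with heq | hd
                · exact absurd heq (by simp)
                · exact hd
              have := ih (k+1) (blocks ++ [(PySem.Str.join "\n" (PySem.List.slice lines (some ((i+1 : Nat) : Int)) (some ((se : Nat) : Int))),
                         PySem.Str.join "\n" (PySem.List.slice lines (some ((rs : Nat) : Int)) (some ((k : Nat) : Int))))]) (by omega)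
              rw [this, hstep,
                pvRun_walk12 lines (k - (i+1)) (i+1) k (le_refl _) (by omega) (by omega) hseg hdiv,
                pvRun_walk2 lines (k - (i+1)) (i+1) k (le_refl _) (by omega) (by omega) hseg,
                pvRun_emit lines k hk2 hk3 hk4]
              simp only [List.length_append, List.length_cons, List.length_nil]
              omega
          | none, some k =>
              obtain ⟨hk1, hk2, hk3, hk4, hseg, _, hnd⟩ := hsome k rfl
              have hseg' : ∀ m, i+1 ≤ m → m < k →
                  pvHasD (lines.getD m "") = false ∧ pvHasR (lines.getD m "") = false := by
                intro m hm1 hm2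
                have hd := hnd rfl m hm1 hm2
                refine ⟨hd, ?_⟩
                cases hhr : pvHasR (lines.getD m "")
                · rfl
                · exact absurd ⟨hhr, hd⟩ (hseg m hm1 hm2)
              rw [ih (i+1) blocks (by omega), hstep,
                ← pvRun_walk01 lines (k - (i+1)) (i+1) k (le_refl _) (by omega) hk2 hseg' hk3 hk4]
          | some (se, rs), none =>
              have hz : ∀ l ∈ lines.drop (i+1), pvHasR l = true → pvHasD l = true := by
                intro l hl hr
                obtain ⟨m, hm, hgm⟩ := List.getElem_of_mem hl
                have hml : i + 1 + m < lines.length := by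
                  have := List.length_drop (l := lines) (i := i+1) ▸ hm; omega
                have hgd : lines.getD (i+1+m) "" = l := by
                  rw [List.getD_eq_getElem lines "" hml, ← hgm, List.getElem_drop]
                exact hgd ▸ hnone rfl (i+1+m) (by omega) hml (hgd ▸ hr)
              rw [ih (i+1) blocks (by omega), hstep,
                pvRun_zero (lines.drop (i+1)) hz 0, pvRun_zero (lines.drop (i+1)) hz 1]
          | none, none =>
              have hz : ∀ l ∈ lines.drop (i+1), pvHasR l = true → pvHasD l = true := by
                intro l hl hr
                obtain ⟨m, hm, hgm⟩ := List.getElem_of_mem hl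
                have hml : i + 1 + m < lines.length := by
                  have := List.length_drop (l := lines) (i := i+1) ▸ hm; omega
                have hgd : lines.getD (i+1+m) "" = l := by
                  rw [List.getD_eq_getElem lines "" hml, ← hgm, List.getElem_drop]
                exact hgd ▸ hnone rfl (i+1+m) (by omega) hml (hgd ▸ hr)
              rw [ih (i+1) blocks (by omega), hstep,
                pvRun_zero (lines.drop (i+1)) hz 0, pvRun_zero (lines.drop (i+1)) hz 1]
        · rw [if_neg hs, ih (i+1) blocks (by omega), pvDrop_cons lines i hi, pvRun_cons0,
            if_neg (fun hc => hs (hgi ▸ hc))]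
      · rw [pvOuterA, dif_neg hi, List.drop_eq_nil_of_le (by omega)]
        simp [pvRun]

-- ===== VERDICT (by name: the statement is the Claim_ definition above) =====
theorem is_complex_edit_spec : Claim_equal_is_complex_edit := by
  intro content filename _
  unfold Spec_is_complex_edit is_complex_edit is_complex_edit_alt pvExtractA
  dsimp only
  have hcnt : (pvOuterA (pvSplitLines content) (pvSplitLines content).length 0 []).length =
      ((pvSplitLines content).foldl pvStepB (0, 0)).1 := by
    rw [pvFoldl_eq_run, pvOuterA_run (pvSplitLines content) (pvSplitLines content).length 0 [] (by omega)]
    simp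
  rw [← hcnt]
  by_cases h1 : (pvOuterA (pvSplitLines content) (pvSplitLines content).length 0 []).length > 2
  · simp [h1]
  · by_cases h2 : (pvSplitLines content).length > 50
    · simp [h1, h2]
    · simp [h1, h2]
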